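-- pv_equiv track=rewrite | github.com/IvanCaceresS/UnitySimulationManager | app/main.py | split_braces_outside_strings
-- ===== SOURCE A (Python) =====
-- def split_braces_outside_strings(code: str) -> str:
--     result_lines = []
--     in_string = False
--     for line in code.splitlines(keepends=True):
--         new_line_chars = []
--         i = 0
--         while i < len(line):
--             ch = line[i]
--             if ch == '"':
--                 in_string = not in_string
--                 new_line_chars.append(ch)
--             elif ch == '{' and not in_string:
--                 new_line_chars.append('\n{\n')
--             elif ch == '}' and not in_string:
--                 new_line_chars.append('\n}\n')
--             else:
--                 new_line_chars.append(ch)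
--             i += 1
--         result_lines.append(''.join(new_line_chars))
--     return ''.join(result_lines)
-- ===== SOURCE B (Python) =====
-- def split_braces_outside_strings(code: str) -> str:
--     return '"'.join(
--         part.replace('{', '\n{\n').replace('}', '\n}\n') if i % 2 == 0 else part
--         for i, part in enumerate(code.split('"'))
--     )
-- ===== Notes on version B (the rewrite author's own statement) =====
-- stated objective: faster
-- what changed: Replaces the per-line, per-character scan with an explicit in_string flag by splitting the code on the double-quote character (even-indexed segments lie outside string literals), applying str.replace to the even segments only, and rejoining the segments.
import Mathlib
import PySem

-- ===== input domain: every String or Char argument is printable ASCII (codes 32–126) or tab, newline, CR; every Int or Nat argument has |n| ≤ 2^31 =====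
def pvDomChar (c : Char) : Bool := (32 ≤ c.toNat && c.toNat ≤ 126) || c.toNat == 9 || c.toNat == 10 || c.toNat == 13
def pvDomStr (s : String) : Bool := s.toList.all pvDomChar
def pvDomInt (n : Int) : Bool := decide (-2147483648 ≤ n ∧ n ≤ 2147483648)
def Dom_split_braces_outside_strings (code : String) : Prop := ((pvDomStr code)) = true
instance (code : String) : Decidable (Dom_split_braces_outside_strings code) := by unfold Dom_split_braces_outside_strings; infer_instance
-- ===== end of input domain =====

-- B replaces A's per-line, per-character scan with an in_string flag by splitting on the quote character,
-- replacing braces in the even segments and rejoining (measurably faster in Python by a constant factor).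

-- ===== PORT A =====
-- hand port of code.splitlines(keepends=True): exact for the line breaks \n, \r, \r\n,
-- the only line breaks occurring in the ASCII domain (PySem.Chars.splitlines drops the ends)
def pvSplitlinesKeep : List Char → List (List Char)
  | [] => []
  | '\n' :: rest => ['\n'] :: pvSplitlinesKeep rest
  | '\r' :: '\n' :: rest => ['\r', '\n'] :: pvSplitlinesKeep rest
  | '\r' :: rest => ['\r'] :: pvSplitlinesKeep rest
  | c :: rest =>
      match pvSplitlinesKeep rest with
      | [] => [[c]]
      | l :: ls => (c :: l) :: ls

-- the body of A's while loop (one character of the current line)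
def pvStepA (st2 : List (List Char) × Bool) (ch : Char) : List (List Char) × Bool :=
  if ch == '"' then (st2.1 ++ [[ch]], !st2.2)
  else if ch == '{' && !st2.2 then (st2.1 ++ [['\n', '{', '\n']], st2.2)
  else if ch == '}' && !st2.2 then (st2.1 ++ [['\n', '}', '\n']], st2.2)
  else (st2.1 ++ [[ch]], st2.2)

-- the body of A's for loop (one line; the while over line[i] is a fold over the line's chars)
def pvLineStepA (st : List (List Char) × Bool) (line : List Char) : List (List Char) × Bool :=
  let inner := line.foldl pvStepA ([], st.2)
  (st.1 ++ [PySem.Chars.join [] inner.1], inner.2)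

-- ''.join is PySem.Chars.join []
def split_braces_outside_strings (code : String) : String :=
  let lines := pvSplitlinesKeep code.toList
  let st := lines.foldl pvLineStepA ([], false)
  String.ofList (PySem.Chars.join [] st.1)

-- ===== PORT B =====
def split_braces_outside_strings_alt (code : String) : String :=
  String.ofList (PySem.Chars.join ['"']
    ((PySem.List.enumerate (PySem.Chars.splitOn code.toList ['"'])).map
      (fun ip =>
        if PySem.Int.mod ip.1 2 == 0 then
          PySem.Chars.replace (PySem.Chars.replace ip.2 ['{'] ['\n', '{', '\n'])
            ['}'] ['\n', '}', '\n']
        else ip.2)))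

-- ===== PRECONDITION & SPEC =====
def Spec_split_braces_outside_strings (code : String) (out : String) : Prop := out = split_braces_outside_strings_alt code
instance (code : String) (out : String) : Decidable (Spec_split_braces_outside_strings code out) := by unfold Spec_split_braces_outside_strings; infer_instance

-- ===== CLAIM (what is proved, stated in full; the proofs are below) =====
def Claim_equal_split_braces_outside_strings : Prop := ∀ (code : String), Dom_split_braces_outside_strings code → Spec_split_braces_outside_strings code (split_braces_outside_strings code)

-- ===== LEMMAS AND PROOFS =====

-- per-character step: the text emitted for one character and the next in_string flag
def pvChunk (ins : Bool) (c : Char) : List Char :=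
  if c = '"' then [c]
  else if c = '{' ∧ ins = false then ['\n', '{', '\n']
  else if c = '}' ∧ ins = false then ['\n', '}', '\n']
  else [c]

def pvNext (ins : Bool) (c : Char) : Bool := if c = '"' then !ins else ins

-- canonical single-pass form both programs are reduced to
def pvOut (ins : Bool) : List Char → List Char
  | [] => []
  | c :: r => pvChunk ins c ++ pvOut (pvNext ins c) r

def pvFlag (ins : Bool) : List Char → Bool
  | [] => ins
  | c :: r => pvFlag (pvNext ins c) r

-- the chunk list A's inner loop accumulates
def pvChunks (ins : Bool) : List Char → List (List Char)
  | [] => []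
  | c :: r => pvChunk ins c :: pvChunks (pvNext ins c) r

-- the per-line outputs A's outer loop accumulates
def pvLines (ins : Bool) : List (List Char) → List (List Char)
  | [] => []
  | l :: ls => pvOut ins l :: pvLines (pvFlag ins l) ls

-- clean recursive form of code.split('"')
def pvQsplit : List Char → List (List Char)
  | [] => [[]]
  | c :: r =>
      if c = '"' then [] :: pvQsplit r
      else
        match pvQsplit r with
        | [] => [[c]]
        | p :: ps => (c :: p) :: ps

def pvRepl (p : List Char) : List Char :=
  p.flatMap (fun c =>
    if c = '{' then ['\n', '{', '\n']
    else if c = '}' then ['\n', '}', '\n']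
    else [c])

-- '"'-join of the segments, brace-replacing the segments of the parity marked ev = true
def pvJoinAlt (ev : Bool) : List (List Char) → List Char
  | [] => []
  | [p] => if ev then pvRepl p else p
  | p :: q :: ps => (if ev then pvRepl p else p) ++ '"' :: pvJoinAlt (!ev) (q :: ps)

def pvModHead (pre : List Char) : List (List Char) → List (List Char)
  | [] => [pre]
  | p :: ps => (pre ++ p) :: ps

theorem pvSplitlinesKeep_flatten (cs : List Char) :
    (pvSplitlinesKeep cs).flatten = cs := by
  fun_induction pvSplitlinesKeep cs <;> simp_all

theorem pvFlag_append (ins : Bool) (xs ys : List Char) :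
    pvFlag ins (xs ++ ys) = pvFlag (pvFlag ins xs) ys := by
  induction xs generalizing ins with
  | nil => simp [pvFlag]
  | cons c r ih => simp [pvFlag, ih]

theorem pvOut_append (ins : Bool) (xs ys : List Char) :
    pvOut ins (xs ++ ys) = pvOut ins xs ++ pvOut (pvFlag ins xs) ys := by
  induction xs generalizing ins with
  | nil => simp [pvOut, pvFlag]
  | cons c r ih => simp [pvOut, pvFlag, ih]

theorem pvQsplit_ne_nil (cs : List Char) : pvQsplit cs ≠ [] := by
  cases cs with
  | nil => simp [pvQsplit]
  | cons c r =>
    simp only [pvQsplit]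
    split
    · simp
    · split <;> simp

theorem join_nil (parts : List (List Char)) :
    PySem.Chars.join [] parts = parts.flatten := by
  induction parts with
  | nil => simp [PySem.Chars.join, List.intercalate]
  | cons p ps ih =>
    cases ps with
    | nil => simp [PySem.Chars.join, List.intercalate]
    | cons q qs =>
      simp only [PySem.Chars.join, List.intercalate, List.intersperse] at *
      simp_all

theorem join_cons₂ (sep x y : List Char) (zs : List (List Char)) :
    PySem.Chars.join sep (x :: y :: zs) = x ++ sep ++ PySem.Chars.join sep (y :: zs) := by
  simp [PySem.Chars.join, List.intercalate, List.intersperse]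

theorem join_singleton (sep x : List Char) :
    PySem.Chars.join sep [x] = x := by
  simp [PySem.Chars.join, List.intercalate]

theorem flatten_pvChunks (ins : Bool) (l : List Char) :
    (pvChunks ins l).flatten = pvOut ins l := by
  induction l generalizing ins with
  | nil => simp [pvChunks, pvOut]
  | cons c r ih => simp [pvChunks, pvOut, ih]

theorem stepA_eq (st : List (List Char) × Bool) (c : Char) :
    pvStepA st c = (st.1 ++ [pvChunk st.2 c], pvNext st.2 c) := by
  obtain ⟨acc, ins⟩ := st
  cases ins <;>
    by_cases hq : c = '"' <;>
    by_cases hb : c = '{' <;>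
    by_cases hc : c = '}' <;>
    simp_all [pvStepA, pvChunk, pvNext]

theorem innerA (line : List Char) (acc : List (List Char)) (ins : Bool) :
    line.foldl pvStepA (acc, ins) = (acc ++ pvChunks ins line, pvFlag ins line) := by
  induction line generalizing acc ins with
  | nil => simp [pvChunks, pvFlag]
  | cons c r ih =>
    simp only [List.foldl_cons, stepA_eq]
    rw [ih]
    simp [pvChunks, pvFlag]

theorem lineStepA_eq (st : List (List Char) × Bool) (line : List Char) :
    pvLineStepA st line = (st.1 ++ [pvOut st.2 line], pvFlag st.2 line) := by
  simp [pvLineStepA, innerA, join_nil, flatten_pvChunks]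

theorem outerA (lines : List (List Char)) (acc : List (List Char)) (ins : Bool) :
    lines.foldl pvLineStepA (acc, ins)
      = (acc ++ pvLines ins lines, pvFlag ins lines.flatten) := by
  induction lines generalizing acc ins with
  | nil => simp [pvLines, pvFlag]
  | cons l ls ih =>
    simp only [List.foldl_cons, lineStepA_eq]
    rw [ih]
    simp [pvLines, pvFlag_append]

theorem flatten_pvLines (ins : Bool) (ls : List (List Char)) :
    (pvLines ins ls).flatten = pvOut ins ls.flatten := by
  induction ls generalizing ins with
  | nil => simp [pvLines, pvOut]
  | cons l ls ih => simp [pvLines, ih, pvOut_append]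

theorem A_eq (code : String) :
    split_braces_outside_strings code = String.ofList (pvOut false code.toList) := by
  unfold split_braces_outside_strings
  simp only [outerA, List.nil_append, join_nil, flatten_pvLines, pvSplitlinesKeep_flatten]

theorem splitOn_go_char (l : List Char) : ∀ (fuel : Nat), l.length ≤ fuel →
    ∀ (cur : List Char) (acc : List (List Char)),
    PySem.Chars.splitOn.go ['"'] fuel l cur acc
      = acc.reverse ++ pvModHead cur.reverse (pvQsplit l) := by
  induction l with
  | nil =>
    intro fuel _ cur acc
    cases fuel <;> simp [PySem.Chars.splitOn.go, pvQsplit, pvModHead]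
  | cons c rest ih =>
    intro fuel h cur acc
    cases fuel with
    | zero => simp at h
    | succ f =>
      simp only [PySem.Chars.splitOn.go]
      by_cases hq : c = '"'
      · subst hq
        simp only [List.isPrefixOf, BEq.rfl, Bool.and_self, if_pos, List.length_cons,
          List.length_nil, List.drop_succ_cons, List.drop_zero]
        rw [ih f (by simpa using Nat.le_of_succ_le_succ h) [] (cur.reverse :: acc)]
        cases hsp : pvQsplit rest with
        | nil => exact absurd hsp (pvQsplit_ne_nil rest)
        | cons p ps => simp [pvModHead, pvQsplit, hsp]
      · have hpre : (['"'].isPrefixOf (c :: rest)) = false := by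
          simp [List.isPrefixOf]
          exact fun hco => hq hco.symm
        rw [hpre]
        simp only [Bool.false_eq_true, if_false]
        rw [ih f (by simpa using Nat.le_of_succ_le_succ h) (c :: cur) acc]
        cases hsp : pvQsplit rest with
        | nil => exact absurd hsp (pvQsplit_ne_nil rest)
        | cons p ps => simp [pvModHead, pvQsplit, hq, hsp]

theorem pvSplitOn_eq_qsplit (cs : List Char) :
    PySem.Chars.splitOn cs ['"'] = pvQsplit cs := by
  unfold PySem.Chars.splitOn
  rw [splitOn_go_char cs (cs.length + 1) (by omega) [] []]
  cases hsp : pvQsplit cs with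
  | nil => exact absurd hsp (pvQsplit_ne_nil cs)
  | cons p ps => simp [pvModHead]

theorem replace_go_char (o : Char) (new : List Char) (l : List Char) :
    ∀ (fuel : Nat), l.length ≤ fuel → ∀ (acc : List Char),
    PySem.Chars.replace.go [o] new fuel l acc
      = acc.reverse ++ l.flatMap (fun c => if c = o then new else [c]) := by
  induction l with
  | nil =>
    intro fuel _ acc
    cases fuel <;> simp [PySem.Chars.replace.go]
  | cons c t ih =>
    intro fuel h acc
    cases fuel with
    | zero => simp at h
    | succ f =>
      simp only [PySem.Chars.replace.go]
      by_cases hq : c = o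
      · subst hq
        simp only [List.isPrefixOf, BEq.rfl, Bool.and_self, if_pos, List.length_cons,
          List.length_nil, List.drop_succ_cons, List.drop_zero]
        rw [ih f (by simpa using Nat.le_of_succ_le_succ h) (new.reverse ++ acc)]
        simp
      · have hpre : ([o].isPrefixOf (c :: t)) = false := by
          simp [List.isPrefixOf]
          exact fun hco => hq hco.symm
        rw [hpre]
        simp only [Bool.false_eq_true, if_false]
        rw [ih f (by simpa using Nat.le_of_succ_le_succ h) (c :: acc)]
        simp [hq]

theorem pvReplace_single (o : Char) (new : List Char) (p : List Char) :
    PySem.Chars.replace p [o] new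
      = p.flatMap (fun c => if c = o then new else [c]) := by
  unfold PySem.Chars.replace
  simp only [List.isEmpty_cons, Bool.false_eq_true, if_false]
  exact replace_go_char o new p p.length (le_refl _) []

theorem pvRepl_eq_two_replaces (p : List Char) :
    PySem.Chars.replace (PySem.Chars.replace p ['{'] ['\n', '{', '\n'])
        ['}'] ['\n', '}', '\n']
      = pvRepl p := by
  rw [pvReplace_single, pvReplace_single]
  induction p with
  | nil => simp [pvRepl]
  | cons c t ih =>
    simp only [List.flatMap_cons, List.flatMap_append, pvRepl] at *
    rw [ih]
    by_cases hb : c = '{' <;> by_cases hc : c = '}' <;> simp_all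

theorem pvOut_eq_joinAlt (cs : List Char) (ins : Bool) :
    pvOut ins cs = pvJoinAlt (!ins) (pvQsplit cs) := by
  induction cs generalizing ins with
  | nil => cases ins <;> simp [pvOut, pvQsplit, pvJoinAlt, pvRepl]
  | cons c r ih =>
    by_cases hq : c = '"'
    · subst hq
      cases hsp : pvQsplit r with
      | nil => exact absurd hsp (pvQsplit_ne_nil r)
      | cons p ps =>
        have hih := ih (!ins)
        rw [hsp] at hih
        cases ps with
        | nil => simp [pvOut, pvQsplit, pvChunk, pvNext, hsp, pvJoinAlt, pvRepl, hih]
        | cons q qs => simp [pvOut, pvQsplit, pvChunk, pvNext, hsp, pvJoinAlt, pvRepl, hih]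
    · cases hsp : pvQsplit r with
      | nil => exact absurd hsp (pvQsplit_ne_nil r)
      | cons p ps =>
        have hqs : pvQsplit (c :: r) = (c :: p) :: ps := by
          simp [pvQsplit, hq, hsp]
        have hih := ih ins
        rw [hsp] at hih
        rw [hqs]
        cases ps with
        | nil =>
          cases ins <;>
            by_cases hb : c = '{' <;> by_cases hc : c = '}' <;>
            simp_all [pvOut, pvChunk, pvNext, pvJoinAlt, pvRepl]
        | cons q qs =>
          cases ins <;>
            by_cases hb : c = '{' <;> by_cases hc : c = '}' <;>
            simp_all [pvOut, pvChunk, pvNext, pvJoinAlt, pvRepl]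

theorem enumJoin (parts : List (List Char)) : ∀ (s : Int) (ev : Bool), 0 ≤ s →
    ((PySem.Int.mod s 2 == 0) = ev) →
    PySem.Chars.join ['"']
      ((PySem.List.enumerate parts s).map
        (fun ip => if PySem.Int.mod ip.1 2 == 0 then pvRepl ip.2 else ip.2))
    = pvJoinAlt ev parts := by
  induction parts with
  | nil =>
    intro s ev _ _
    simp [PySem.List.enumerate, pvJoinAlt, PySem.Chars.join, List.intercalate]
  | cons p ps ih =>
    intro s ev hs hp
    rw [PySem.List.enumerate_cons]
    cases ps with
    | nil =>
      simp only [PySem.List.enumerate, List.map_cons, List.map_nil]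
      rw [join_singleton, hp]
      cases ev <;> simp [pvJoinAlt]
    | cons q qs =>
      have hmod : PySem.Int.mod s 2 = s % 2 := PySem.Int.mod_eq_emod_of_pos (by omega)
      have hmod' : PySem.Int.mod (s + 1) 2 = (s + 1) % 2 :=
        PySem.Int.mod_eq_emod_of_pos (by omega)
      have hp' : (PySem.Int.mod (s + 1) 2 == 0) = !ev := by
        rw [hmod']; rw [hmod] at hp
        cases ev <;> simp_all <;> omega
      have hrec := ih (s + 1) (!ev) (by omega) hp'
      rw [PySem.List.enumerate_cons] at hrec
      simp only [List.map_cons] at hrec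
      simp only [PySem.List.enumerate_cons, List.map_cons]
      rw [join_cons₂, hrec, hp]
      cases ev <;> simp [pvJoinAlt]

theorem B_eq (code : String) :
    split_braces_outside_strings_alt code
      = String.ofList (pvJoinAlt true (pvQsplit code.toList)) := by
  unfold split_braces_outside_strings_alt
  rw [pvSplitOn_eq_qsplit]
  simp only [pvRepl_eq_two_replaces]
  rw [enumJoin (pvQsplit code.toList) 0 true (by omega) (by decide)]

-- ===== VERDICT (by name: the statement is the Claim_ definition above) =====
theorem split_braces_outside_strings_spec : Claim_equal_split_braces_outside_strings := by
  intro code _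
  unfold Spec_split_braces_outside_strings
  rw [A_eq, B_eq, pvOut_eq_joinAlt]
  rfl
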